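-- pv_equiv track=rewrite | github.com/hub-bla/sorting_algo | test.py | A_shaped_data
-- ===== SOURCE A (Python) =====
-- def A_shaped_data(length):
--     n = length//2
--     arr = []
--     for i in range(1, n+1):
--         arr.append(i)
--     for j in range(length-n, 0, -1):
--         arr.append(j)
--
--     return arr
-- ===== SOURCE B (Python) =====
-- def A_shaped_data(length):
--     return [min(i + 1, length - i) for i in range(length)]
-- ===== Notes on version B (the rewrite author's own statement) =====
-- stated objective: simpler
-- what changed: Replaced A's two directional loops (ascending 1..length//2, then descending length-length//2..1) with a single pass computing each element by the closed form min(i+1, length-i).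
import Mathlib
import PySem

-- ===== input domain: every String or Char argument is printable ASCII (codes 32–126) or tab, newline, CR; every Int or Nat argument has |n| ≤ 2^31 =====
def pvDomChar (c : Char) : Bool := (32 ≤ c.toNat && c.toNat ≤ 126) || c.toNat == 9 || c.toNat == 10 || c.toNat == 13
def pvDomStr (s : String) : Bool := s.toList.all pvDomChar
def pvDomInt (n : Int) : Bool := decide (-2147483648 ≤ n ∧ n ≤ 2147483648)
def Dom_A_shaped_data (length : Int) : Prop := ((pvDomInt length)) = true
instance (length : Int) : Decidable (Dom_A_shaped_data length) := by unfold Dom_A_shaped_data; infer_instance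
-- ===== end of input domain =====

-- B replaces A's two directional append loops by one pass with the closed form min(i+1, length-i): simpler.

-- ===== PORT A =====
def A_shaped_data (length : Int) : List Int :=
  let n := PySem.Int.floordiv length 2
  let arr : List Int := []
  let arr := (PySem.List.pyRange 1 (n + 1) 1).foldl (fun acc i => acc ++ [i]) arr
  let arr := (PySem.List.pyRange (length - n) 0 (-1)).foldl (fun acc j => acc ++ [j]) arr
  arr

-- ===== PORT B =====
def A_shaped_data_alt (length : Int) : List Int :=
  (PySem.List.pyRange 0 length 1).map (fun i => min (i + 1) (length - i))

-- ===== PRECONDITION & SPEC =====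
def Spec_A_shaped_data (length : Int) (out : List Int) : Prop := out = A_shaped_data_alt length
instance (length : Int) (out : List Int) : Decidable (Spec_A_shaped_data length out) := by unfold Spec_A_shaped_data; infer_instance

-- ===== CLAIM (what is proved, stated in full; the proofs are below) =====
def Claim_equal_A_shaped_data : Prop := ∀ (length : Int), Dom_A_shaped_data length → Spec_A_shaped_data length (A_shaped_data length)

-- ===== LEMMAS AND PROOFS =====

theorem pv_foldl_append (xs : List Int) (init : List Int) :
    xs.foldl (fun acc i => acc ++ [i]) init = init ++ xs := by
  induction xs generalizing init with
  | nil => simp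
  | cons x xs ih => simp [List.foldl, ih]

theorem pv_lists_eq (length : Int) :
    PySem.List.pyRange 1 (PySem.Int.floordiv length 2 + 1) 1
      ++ PySem.List.pyRange (length - PySem.Int.floordiv length 2) 0 (-1)
    = (PySem.List.pyRange 0 length 1).map (fun i => min (i + 1) (length - i)) := by
  have hfd : PySem.Int.floordiv length 2 = length / 2 := by
    simp [PySem.Int.floordiv, Int.fdiv_eq_ediv]
  rw [hfd]
  rw [PySem.List.pyRange_one, PySem.List.pyRange_one, PySem.List.pyRange_neg_one]
  rw [List.map_map]
  apply List.ext_getElem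
  · simp only [List.length_append, List.length_map, List.length_range]
    omega
  · intro k h1 h2
    simp only [List.length_map, List.length_range] at h2
    rw [List.getElem_append]
    split_ifs with hk
    · simp only [List.length_map, List.length_range] at hk
      simp only [List.getElem_map, List.getElem_range, Function.comp]
      have hkn : (k : Int) < length / 2 + 1 - 1 := by omega
      simp only [Int.min_def]
      split_ifs <;> omega
    · simp only [List.length_map, List.length_range] at hk ⊢
      simp only [List.getElem_map, List.getElem_range, Function.comp]
      have hkl : (k : Int) < length - 0 := by omega
      simp only [Int.min_def]
      split_ifs <;> omega

-- ===== VERDICT (by name: the statement is the Claim_ definition above) =====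
theorem A_shaped_data_spec : Claim_equal_A_shaped_data := by
  intro length _
  unfold Spec_A_shaped_data A_shaped_data A_shaped_data_alt
  simp only [pv_foldl_append, List.nil_append]
  exact pv_lists_eq length
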